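-- pv_equiv track=rewrite | github.com/r3lphi/juice-quest | parsing.py | parsing_generate_articled
-- ===== SOURCE A (Python) =====
-- vowels = ["a", "e", "i", "o", "u"]
--
-- def parsing_generate_articled(words, uppercaseWhitelist=[]):
--     built = ""
--     k = 0
--     for word in words:
--         if k == len(words) - 1 and len(words) > 1:
--             built += "and "
--
--         if word not in uppercaseWhitelist:
--             word = word.lower()
--
--         if word[0] in vowels:
--             built += ("an " + word)
--         else:
--             built += ("a " + word)
--
--         if k < len(words) - 1:
--             built += ", "
--
--         k += 1
--     built += "."
--     return built
-- ===== SOURCE B (Python) =====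
-- vowels = ["a", "e", "i", "o", "u"]
--
-- def parsing_generate_articled(words, uppercaseWhitelist=[]):
--     def art(word):
--         w = word if word in uppercaseWhitelist else word.lower()
--         return ("an " if w[0] in vowels else "a ") + w
--
--     if not words:
--         return "."
--     tail = ("and " if len(words) > 1 else "") + art(words[-1])
--     for word in reversed(words[:-1]):
--         tail = art(word) + ", " + tail
--     return tail + "."
-- ===== Notes on version B (the rewrite author's own statement) =====
-- stated objective: simpler
-- what changed: B builds the sentence back-to-front: it seeds the accumulator with the last word (attaching the conjunction once there) and walks the remaining words in reverse prepending 'articled word + ", "', so no index bookkeeping or per-iteration position tests against len(words) remain from A's forward indexed loop.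
import Mathlib
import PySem

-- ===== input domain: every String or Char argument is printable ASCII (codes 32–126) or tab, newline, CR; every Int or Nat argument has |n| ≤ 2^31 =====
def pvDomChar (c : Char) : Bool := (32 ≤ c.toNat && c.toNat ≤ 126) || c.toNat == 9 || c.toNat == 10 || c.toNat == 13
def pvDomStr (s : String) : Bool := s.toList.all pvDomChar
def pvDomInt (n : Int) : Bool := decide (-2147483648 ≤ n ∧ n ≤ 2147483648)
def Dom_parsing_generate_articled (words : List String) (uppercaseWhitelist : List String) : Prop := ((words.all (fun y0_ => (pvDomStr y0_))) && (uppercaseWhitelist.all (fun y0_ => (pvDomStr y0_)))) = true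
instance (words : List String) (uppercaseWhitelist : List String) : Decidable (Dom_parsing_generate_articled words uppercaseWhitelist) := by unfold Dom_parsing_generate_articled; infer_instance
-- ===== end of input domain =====

-- B builds the sentence back-to-front: it seeds the accumulator with the last
-- word (conjunction attached once) and prepends the rest in reverse; simpler
-- than A's forward loop with per-iteration position tests.


-- `word[0] in vowels` tests the 1-char string word[0] against ["a","e","i","o","u"];
-- exact as the first CHAR being one of 'a' 'e' 'i' 'o' 'u'.
def pvIsVowelStart (w : String) : Bool :=
  match PySem.Str.pyGet? w 0 with
  | some c => ['a', 'e', 'i', 'o', 'u'].contains c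
  | none => false   -- Python raises IndexError here; excluded by Pre_

-- ===== PORT A =====
-- the body of A's for-loop, on state (built, k); n = len(words)
def pvStepA (uppercaseWhitelist : List String) (n : Nat) (st : String × Nat) (word : String) : String × Nat :=
  let built := st.1
  let k := st.2
  let built := if k = n - 1 ∧ 1 < n then built ++ "and " else built
  let word := if uppercaseWhitelist.contains word then word else PySem.Str.lower word
  let built := if pvIsVowelStart word then built ++ ("an " ++ word) else built ++ ("a " ++ word)
  let built := if k < n - 1 then built ++ ", " else built
  (built, k + 1)

def parsing_generate_articled (words : List String) (uppercaseWhitelist : List String) : String :=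
  let n := words.length
  let r := words.foldl (pvStepA uppercaseWhitelist n) ("", 0)
  r.1 ++ "."

-- ===== PORT B =====
-- B's helper art(word)
def pvArt (uppercaseWhitelist : List String) (word : String) : String :=
  let w := if uppercaseWhitelist.contains word then word else PySem.Str.lower word
  (if pvIsVowelStart w then "an " else "a ") ++ w

def parsing_generate_articled_alt (words : List String) (uppercaseWhitelist : List String) : String :=
  match words with
  | [] => "."
  | _ =>
    -- words[-1] on a non-empty list is its last element
    let tail := (if 1 < words.length then "and " else "") ++ pvArt uppercaseWhitelist (words.getLastD "")
    -- for word in reversed(words[:-1]): tail = art(word) + ", " + tail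
    let tail := words.dropLast.reverse.foldl
      (fun t word => pvArt uppercaseWhitelist word ++ ", " ++ t) tail
    tail ++ "."

-- ===== PRECONDITION & SPEC =====
-- Pre_ excludes words that are the empty string: there `word[0]` raises IndexError in A (and in B).
def Pre_parsing_generate_articled (words : List String) (uppercaseWhitelist : List String) : Prop :=
  ∀ w ∈ words, w ≠ ""
instance (words : List String) (uppercaseWhitelist : List String) : Decidable (Pre_parsing_generate_articled words uppercaseWhitelist) := by unfold Pre_parsing_generate_articled; infer_instance

def pvWitness_parsing_generate_articled : List String × List String := (["Apple", "ox", "Kit"], ["Kit"])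

def Spec_parsing_generate_articled (words : List String) (uppercaseWhitelist : List String) (out : String) : Prop := out = parsing_generate_articled_alt words uppercaseWhitelist
instance (words : List String) (uppercaseWhitelist : List String) (out : String) : Decidable (Spec_parsing_generate_articled words uppercaseWhitelist out) := by unfold Spec_parsing_generate_articled; infer_instance

-- ===== CLAIM (what is proved, stated in full; the proofs are below) =====
def Claim_equal_parsing_generate_articled : Prop := ∀ (words : List String) (uppercaseWhitelist : List String), Dom_parsing_generate_articled words uppercaseWhitelist → Pre_parsing_generate_articled words uppercaseWhitelist → Spec_parsing_generate_articled words uppercaseWhitelist (parsing_generate_articled words uppercaseWhitelist)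

-- ===== LEMMAS AND PROOFS =====

-- proof helper: the common recursive shape of the sentence body
def pvRec (uppercaseWhitelist : List String) (conj : Bool) : List String → String
  | [] => ""
  | [w] => (if conj then "and " else "") ++ pvArt uppercaseWhitelist w
  | w :: w' :: ws => pvArt uppercaseWhitelist w ++ ", " ++ pvRec uppercaseWhitelist conj (w' :: ws)

theorem pvStepA_mid (ul : List String) (n k : Nat) (built w : String)
    (h1 : k < n - 1) :
    pvStepA ul n (built, k) w = (built ++ (pvArt ul w ++ ", "), k + 1) := by
  have h2 : ¬ (k = n - 1 ∧ 1 < n) := by omega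
  simp only [pvStepA, pvArt, if_neg h2, if_pos h1]
  split_ifs <;> simp [String.append_assoc]

theorem pvStepA_last (ul : List String) (n k : Nat) (built w : String)
    (hkn : k = n - 1) :
    pvStepA ul n (built, k) w
      = (built ++ ((if 1 < n then "and " else "") ++ pvArt ul w), k + 1) := by
  have hlt : ¬ k < n - 1 := by omega
  by_cases hgt : 1 < n
  · have hc : k = n - 1 ∧ 1 < n := ⟨hkn, hgt⟩
    simp only [pvStepA, pvArt, if_pos hc, if_neg hlt, if_pos hgt]
    split_ifs <;> rw [String.append_assoc]
  · have hc : ¬ (k = n - 1 ∧ 1 < n) := fun h => hgt h.2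
    simp only [pvStepA, pvArt, if_neg hc, if_neg hlt, if_neg hgt]
    split_ifs <;> simp [String.append_assoc]

-- A's fold over any suffix l of the words, started at index k, equals B's recursion on l.
theorem pvA_fold (ul : List String) (n : Nat) (l : List String) :
    ∀ (k : Nat) (built : String), k + l.length = n →
    (l.foldl (pvStepA ul n) (built, k)).1 = built ++ pvRec ul (decide (1 < n)) l := by
  induction l with
  | nil => intro k built _; simp [pvRec]
  | cons w ws ih =>
    intro k built hk
    cases ws with
    | nil =>
      simp only [List.length_cons, List.length_nil] at hk
      rw [List.foldl_cons, pvStepA_last ul n k built w (by omega),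
        List.foldl_nil, pvRec]
      by_cases hn : 1 < n <;> simp [hn]
    | cons w' ws' =>
      simp only [List.length_cons] at hk
      rw [List.foldl_cons, pvStepA_mid ul n k built w (by omega),
        ih (k + 1) _ (by simp; omega), pvRec, String.append_assoc]

-- B's reverse fold over the initial words, seeded with the last part, equals pvRec.
theorem pvB_fold (ul : List String) (c : Prop) [Decidable c] (l : List String) (d : String)
    (hl : l ≠ []) :
    l.dropLast.reverse.foldl (fun t word => pvArt ul word ++ ", " ++ t)
        ((if c then "and " else "") ++ pvArt ul (l.getLastD d))
      = pvRec ul (decide c) l := by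
  induction l generalizing d with
  | nil => exact absurd rfl hl
  | cons w ws ih =>
    cases ws with
    | nil => simp [pvRec]
    | cons w' ws' =>
      rw [List.dropLast_cons_of_ne_nil (by simp), List.reverse_cons, List.foldl_concat,
        List.getLastD_cons, ih w (by simp), pvRec]

-- ===== VERDICT (by name: the statement is the Claim_ definition above) =====
theorem parsing_generate_articled_spec : Claim_equal_parsing_generate_articled := by
  intro words ul _ _
  simp only [Spec_parsing_generate_articled, parsing_generate_articled,
    parsing_generate_articled_alt]
  cases words with
  | nil => rfl
  | cons w ws =>
    rw [pvA_fold ul (w :: ws).length (w :: ws) 0 "" (by simp)]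
    rw [show (match w :: ws with
        | [] => "."
        | _ => (w :: ws).dropLast.reverse.foldl
            (fun t word => pvArt ul word ++ ", " ++ t)
            ((if 1 < (w :: ws).length then "and " else "") ++ pvArt ul ((w :: ws).getLastD "")) ++ ".")
      = (w :: ws).dropLast.reverse.foldl
            (fun t word => pvArt ul word ++ ", " ++ t)
            ((if 1 < (w :: ws).length then "and " else "") ++ pvArt ul ((w :: ws).getLastD "")) ++ "." from rfl,
      pvB_fold ul (1 < (w :: ws).length) (w :: ws) "" (by simp)]
    simp
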